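-- pv_equiv track=rewrite | github.com/hyebney/python | a1.py | pair_genes
-- ===== SOURCE A (Python) =====
-- def pair_genes(first_gene, second_gene):
--     ''' (str, str) -> bool
--     Genes can be paired together by allowing the nucleotides from
--     the first gene to pair-bond with the nucleotides from the second gene.
--     Guanine will pair with cytosine, and adenine will pair with thymine.
--     Genes can also pair in either direction. This function takes in two
--     string representations of genes and returns a boolean that indicates
--     whether the two genes can pair or not.
--     REQ: genes must be consisted of letters {A, G, C, T}
--     >>> pair_genes("TCAG", "AGTC")
--     True
--     >>> pair_genes("TCAG", "CTGA")
--     True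
--     >>> pair_genes("TCAG", "CCAG")
--     False
--     '''
--
--     # declare a boolean that indicates whether the two genes are pairable
--     can_pair = False
--
--     # create a sample of gene that can pair
--     sample_gene = ""
--     for nucleotide in first_gene:
--         if (nucleotide == "A"):
--             sample_gene += "T"
--         elif (nucleotide == "T"):
--             sample_gene += "A"
--         elif (nucleotide == "G"):
--             sample_gene += "C"
--         else:
--             sample_gene += "G"
--
--     # check if the sample gene matches the second gene
--     if (second_gene == sample_gene):
--         can_pair = True
--
--     # genes can also pair either direction
--     if (second_gene[::-1] == sample_gene):
--         can_pair = True
--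
--     # returns the boolean that indicates whether the two genes can pair
--     return can_pair
-- ===== SOURCE B (Python) =====
-- def pair_genes(first_gene, second_gene):
--     comp = {'A': 'T', 'T': 'A', 'G': 'C'}
--     n = len(first_gene)
--     if n != len(second_gene):
--         return False
--     fwd = True
--     rev = True
--     i = 0
--     j = n - 1
--     while i < n and (fwd or rev):
--         c = comp.get(first_gene[i], 'G')
--         if c != second_gene[i]:
--             fwd = False
--         if c != second_gene[j]:
--             rev = False
--         i += 1
--         j -= 1
--     return fwd or rev
-- ===== Notes on version B (the rewrite author's own statement) =====
-- stated objective: faster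
-- what changed: Instead of materializing the complement string and comparing it against the second gene twice (plain and reversed), B does a single fused two-pointer index loop checking both orientations at once with two boolean flags, exiting early as soon as both fail; no intermediate string or reversal is built.
import Mathlib
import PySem

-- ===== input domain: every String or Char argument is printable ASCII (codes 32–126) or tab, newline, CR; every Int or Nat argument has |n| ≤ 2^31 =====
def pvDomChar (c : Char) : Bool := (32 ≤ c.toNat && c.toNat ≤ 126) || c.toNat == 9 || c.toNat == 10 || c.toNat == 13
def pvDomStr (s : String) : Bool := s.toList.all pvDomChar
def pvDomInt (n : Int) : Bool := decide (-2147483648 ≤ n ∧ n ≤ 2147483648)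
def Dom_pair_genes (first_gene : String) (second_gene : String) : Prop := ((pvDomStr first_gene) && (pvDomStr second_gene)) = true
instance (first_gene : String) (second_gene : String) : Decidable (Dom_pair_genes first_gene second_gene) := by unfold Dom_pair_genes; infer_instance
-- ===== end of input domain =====

-- B replaces A's "build the complement string, compare it twice (plain and reversed)" by a
-- single fused two-pointer index loop checking both orientations at once with two flags and
-- early exit; it builds no intermediate string (measured faster in a timing run).


-- ===== PORT A =====
-- strings handled as List Char; `second_gene[::-1]` is exactly `List.reverse` (hand port, exact)
def pair_genes (first_gene : String) (second_gene : String) : Bool :=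
  let sample := first_gene.toList.foldl (fun acc c =>
    acc ++ [if c = 'A' then 'T' else if c = 'T' then 'A' else if c = 'G' then 'C' else 'G'])
    ([] : List Char)
  let can_pair := false
  let can_pair := if second_gene.toList = sample then true else can_pair
  let can_pair := if second_gene.toList.reverse = sample then true else can_pair
  can_pair

-- ===== PORT B =====
-- the dict literal {'A':'T','T':'A','G':'C'} (insertion order)
def pgCompDict : PySem.Dict Char Char :=
  ((PySem.Dict.empty.insert 'A' 'T').insert 'T' 'A').insert 'G' 'C'

-- the while loop of Source B: state (i, j, fwd, rev); indices are in range whenever the loop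
-- body runs (i < n = length of both lists), so `getD`/`toNat` are exact here
def pgLoop (f s : List Char) (n i : Nat) (j : Int) (fwd rev : Bool) : Bool :=
  if h : i < n ∧ (fwd || rev) = true then
    let c := PySem.Dict.getD pgCompDict (f.getD i ' ') 'G'
    let fwd' := if c ≠ s.getD i ' ' then false else fwd
    let rev' := if c ≠ s.getD j.toNat ' ' then false else rev
    pgLoop f s n (i + 1) (j - 1) fwd' rev'
  else fwd || rev
termination_by n - i
decreasing_by omega

def pair_genes_alt (first_gene : String) (second_gene : String) : Bool :=
  let n := first_gene.toList.length
  if n ≠ second_gene.toList.length then false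
  else pgLoop first_gene.toList second_gene.toList n 0 ((n : Int) - 1) true true

-- ===== PRECONDITION & SPEC =====
def Spec_pair_genes (first_gene : String) (second_gene : String) (out : Bool) : Prop := out = pair_genes_alt first_gene second_gene
instance (first_gene : String) (second_gene : String) (out : Bool) : Decidable (Spec_pair_genes first_gene second_gene out) := by unfold Spec_pair_genes; infer_instance

-- ===== CLAIM (what is proved, stated in full; the proofs are below) =====
def Claim_equal_pair_genes : Prop := ∀ (first_gene : String) (second_gene : String), Dom_pair_genes first_gene second_gene → Spec_pair_genes first_gene second_gene (pair_genes first_gene second_gene)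

-- ===== LEMMAS AND PROOFS =====

def pgComp (c : Char) : Char :=
  if c = 'A' then 'T' else if c = 'T' then 'A' else if c = 'G' then 'C' else 'G'

theorem pgDecideCons {α : Type} [DecidableEq α] (a b : α) (l m : List α) :
    decide (a :: l = b :: m) = (decide (b = a) && decide (l = m)) := by
  by_cases h : b = a <;> by_cases h2 : l = m <;> simp_all [eq_comm]

theorem pgCompDict_getD (c : Char) : PySem.Dict.getD pgCompDict c 'G' = pgComp c := by
  simp only [pgCompDict, pgComp, PySem.Dict.getD_insert, PySem.Dict.getD_empty]
  split_ifs <;> simp_all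

-- loop invariant: with j = n-1-i, the loop decides "rest of s matches" for both orientations
theorem pgLoop_eq (fl sl : List Char) (n : Nat) (hf : fl.length = n) (hs : sl.length = n) :
    ∀ k i fwd rev, i ≤ n → n - i = k →
    pgLoop fl sl n i ((n : Int) - 1 - i) fwd rev =
      ((fwd && decide (sl.drop i = (fl.drop i).map pgComp)) ||
       (rev && decide (sl.reverse.drop i = (fl.drop i).map pgComp))) := by
  intro k
  induction k with
  | zero =>
    intro i fwd rev hi hk
    have h1 : sl.drop i = [] := List.drop_eq_nil_iff.mpr (by omega)
    have h2 : fl.drop i = [] := List.drop_eq_nil_iff.mpr (by omega)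
    have h3 : sl.reverse.drop i = [] := List.drop_eq_nil_iff.mpr (by simp; omega)
    rw [pgLoop, dif_neg (by omega), h1, h2, h3]
    simp
  | succ k ih =>
    intro i fwd rev hi hk
    have hin : i < n := by omega
    by_cases hfr : (fwd || rev) = true
    · have hilt_s : i < sl.length := by omega
      have hilt_f : i < fl.length := by omega
      have hilt_r : i < sl.reverse.length := by simp; omega
      have hnlt : n - 1 - i < sl.length := by omega
      have hgf : fl.getD i ' ' = fl[i] := List.getD_eq_getElem fl ' ' hilt_f
      have hgs : sl.getD i ' ' = sl[i] := List.getD_eq_getElem sl ' ' hilt_s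
      have hgr : sl.getD ((n : Int) - 1 - i).toNat ' ' = sl.reverse[i] := by
        have ht : ((n : Int) - 1 - i).toNat = n - 1 - i := by omega
        rw [ht, List.getD_eq_getElem sl ' ' hnlt, List.getElem_reverse]
        congr 1
        omega
      rw [pgLoop, dif_pos ⟨hin, hfr⟩]
      simp only [pgCompDict_getD, hgf, hgs, hgr]
      rw [show (n : Int) - 1 - i - 1 = (n : Int) - 1 - ((i + 1 : Nat) : Int) from by push_cast; ring]
      rw [ih (i + 1) _ _ (by omega) (by omega)]
      have hdF : decide (sl.drop i = (fl.drop i).map pgComp)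
          = (decide (pgComp fl[i] = sl[i]) && decide (sl.drop (i + 1) = (fl.drop (i + 1)).map pgComp)) := by
        rw [List.drop_eq_getElem_cons hilt_s, List.drop_eq_getElem_cons hilt_f, List.map_cons,
            pgDecideCons]
      have hdR : decide (sl.reverse.drop i = (fl.drop i).map pgComp)
          = (decide (pgComp fl[i] = sl.reverse[i]) && decide (sl.reverse.drop (i + 1) = (fl.drop (i + 1)).map pgComp)) := by
        rw [List.drop_eq_getElem_cons hilt_r, List.drop_eq_getElem_cons hilt_f, List.map_cons,
            pgDecideCons]
      rw [hdF, hdR]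
      have hite : ∀ (x y : Char) (b : Bool), (if x ≠ y then false else b) = (b && decide (x = y)) := by
        intro x y b; by_cases h : x = y <;> simp [h]
      simp only [hite, Bool.and_assoc]
    · rw [pgLoop, dif_neg (by tauto)]
      have h1 : fwd = false := by revert hfr; cases fwd <;> simp
      have h2 : rev = false := by revert hfr; cases fwd <;> cases rev <;> simp
      simp [h1, h2]

-- ===== VERDICT (by name: the statement is the Claim_ definition above) =====
theorem pair_genes_spec : Claim_equal_pair_genes := by
  intro f s _
  unfold Spec_pair_genes pair_genes pair_genes_alt
  simp only [PySem.List.foldl_append_singleton_eq_map, List.nil_append]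
  have hmap : (fun c => if c = 'A' then 'T' else if c = 'T' then 'A' else if c = 'G' then 'C' else 'G') = pgComp := rfl
  rw [hmap]
  by_cases hlen : f.toList.length = s.toList.length
  · have hlen' : ¬ f.toList.length ≠ s.toList.length := by omega
    rw [if_neg hlen']
    rw [show ((f.toList.length : Int) - 1) = (f.toList.length : Int) - 1 - ((0 : Nat) : Int) from by push_cast; ring]
    rw [pgLoop_eq f.toList s.toList f.toList.length rfl hlen.symm (f.toList.length - 0) 0 true true (by omega) rfl]
    simp only [List.drop_zero, Bool.true_and]
    by_cases c1 : s.toList = f.toList.map pgComp <;>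
      by_cases c2 : s.toList.reverse = f.toList.map pgComp <;>
        simp [c1, c2]
  · rw [if_pos hlen]
    have h1 : ¬ s.toList = f.toList.map pgComp := fun h => hlen (by simp [h])
    have h2 : ¬ s.toList.reverse = f.toList.map pgComp := by
      intro h
      apply hlen
      have := congrArg List.length h
      simpa using this.symm
    simp only [if_neg h1, if_neg h2]
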